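-- pv_equiv track=rewrite | github.com/sathish0804/POC_2 | scripts/multiproc_frame_ranges.py | split_frame_ranges
-- ===== SOURCE A (Python) =====
-- from typing import List, Tuple
--
-- def split_frame_ranges(total_frames: int, num_processes: int) -> List[Tuple[int, int]]:
--     """
--     Evenly partition [0, total_frames) into num_processes contiguous ranges.
--     Distributes any remainder to the first 'remainder' ranges.
--     """
--     if num_processes <= 0:
--         return [(0, total_frames)]
--
--     base = total_frames // num_processes
--     remainder = total_frames % num_processes
--
--     ranges: List[Tuple[int, int]] = []
--     start = 0
--     for i in range(num_processes):
--         count = base + (1 if i < remainder else 0)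
--         end = start + count
--         ranges.append((start, end))
--         start = end
--     return ranges
-- ===== SOURCE B (Python) =====
-- def split_frame_ranges(total_frames, num_processes):
--     if num_processes <= 0:
--         return [(0, total_frames)]
--     base = total_frames // num_processes
--     remainder = total_frames % num_processes
--     return [
--         (i * base + min(i, remainder), (i + 1) * base + min(i + 1, remainder))
--         for i in range(num_processes)
--     ]
-- ===== Notes on version B (the rewrite author's own statement) =====
-- stated objective: alternative
-- what changed: Replaced the accumulating loop carrying a running start with a closed-form per-index computation: each boundary is derived independently as i*base + min(i, remainder).
import Mathlib
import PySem

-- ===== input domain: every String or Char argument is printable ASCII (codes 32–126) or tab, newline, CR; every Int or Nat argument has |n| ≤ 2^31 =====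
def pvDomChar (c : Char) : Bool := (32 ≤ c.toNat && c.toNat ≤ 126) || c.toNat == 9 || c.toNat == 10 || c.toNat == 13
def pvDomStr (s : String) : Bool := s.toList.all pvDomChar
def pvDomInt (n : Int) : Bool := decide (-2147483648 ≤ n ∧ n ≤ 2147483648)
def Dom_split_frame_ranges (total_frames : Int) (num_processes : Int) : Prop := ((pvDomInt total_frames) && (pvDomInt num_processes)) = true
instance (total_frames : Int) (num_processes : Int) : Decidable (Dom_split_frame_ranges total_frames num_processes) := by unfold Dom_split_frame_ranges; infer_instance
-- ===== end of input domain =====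

-- B replaces A's accumulating loop (running `start`) with a closed-form per-index
-- computation i*base + min(i, remainder); same values, alternative decomposition.

-- ===== PORT A =====
def split_frame_ranges (total_frames : Int) (num_processes : Int) : List (Int × Int) :=
  if num_processes ≤ 0 then [(0, total_frames)]
  else
    let base := PySem.Int.floordiv total_frames num_processes
    let remainder := PySem.Int.mod total_frames num_processes
    ((PySem.List.pyRange 0 num_processes 1).foldl
      (fun (st : List (Int × Int) × Int) i =>
        let count := base + (if i < remainder then 1 else 0)
        let e := st.2 + count
        (st.1 ++ [(st.2, e)], e))
      ([], 0)).1

-- ===== PORT B =====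
def split_frame_ranges_alt (total_frames : Int) (num_processes : Int) : List (Int × Int) :=
  if num_processes ≤ 0 then [(0, total_frames)]
  else
    let base := PySem.Int.floordiv total_frames num_processes
    let remainder := PySem.Int.mod total_frames num_processes
    (PySem.List.pyRange 0 num_processes 1).map
      (fun i => (i * base + min i remainder, (i + 1) * base + min (i + 1) remainder))

-- ===== PRECONDITION & SPEC =====
def Spec_split_frame_ranges (total_frames : Int) (num_processes : Int) (out : List (Int × Int)) : Prop := out = split_frame_ranges_alt total_frames num_processes
instance (total_frames : Int) (num_processes : Int) (out : List (Int × Int)) : Decidable (Spec_split_frame_ranges total_frames num_processes out) := by unfold Spec_split_frame_ranges; infer_instance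

-- ===== CLAIM (what is proved, stated in full; the proofs are below) =====
def Claim_equal_split_frame_ranges : Prop := ∀ (total_frames : Int) (num_processes : Int), Dom_split_frame_ranges total_frames num_processes → Spec_split_frame_ranges total_frames num_processes (split_frame_ranges total_frames num_processes)

-- ===== LEMMAS AND PROOFS =====

-- Loop invariant: after processing range(0, n), A's accumulator holds B's map, and
-- the running start equals n*base + min n remainder.
theorem sfr_loop (base remainder : Int) (hrem : 0 ≤ remainder) :
    ∀ n : Nat,
      ((PySem.List.pyRange 0 (n : Int) 1).foldl
        (fun (st : List (Int × Int) × Int) i =>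
          let count := base + (if i < remainder then 1 else 0)
          let e := st.2 + count
          (st.1 ++ [(st.2, e)], e))
        ([], 0))
      = ((PySem.List.pyRange 0 (n : Int) 1).map
          (fun i => (i * base + min i remainder, (i + 1) * base + min (i + 1) remainder)),
         (n : Int) * base + min (n : Int) remainder) := by
  intro n
  induction n with
  | zero => simp [PySem.List.pyRange_one_eq_nil, min_eq_left hrem]
  | succ m ih =>
      have hsplit : PySem.List.pyRange 0 ((m + 1 : Nat) : Int) 1
          = PySem.List.pyRange 0 (m : Int) 1 ++ [(m : Int)] := by
        have h := PySem.List.pyRange_one_succ_right (Int.natCast_nonneg m)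
        push_cast
        exact h
      have key : ((m : Int)) * base + min (m : Int) remainder
            + (base + if ((m : Int)) < remainder then 1 else 0)
          = ((m : Int) + 1) * base + min ((m : Int) + 1) remainder := by
        split_ifs with h
        · rw [min_eq_left h.le, min_eq_left (by omega)]; ring
        · rw [min_eq_right (by omega), min_eq_right (by omega)]; ring
      rw [hsplit, List.foldl_append, List.map_append, ih]
      simp only [List.foldl_cons, List.foldl_nil, List.map_cons, List.map_nil, Prod.mk.injEq]
      push_cast
      exact ⟨by rw [key], key⟩

-- ===== VERDICT (by name: the statement is the Claim_ definition above) =====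
theorem split_frame_ranges_spec : Claim_equal_split_frame_ranges := by
  intro tf np _
  unfold Spec_split_frame_ranges split_frame_ranges split_frame_ranges_alt
  by_cases h : np ≤ 0
  · simp [h]
  · simp only [h, if_false]
    have hnp : ((np.toNat : Nat) : Int) = np := Int.toNat_of_nonneg (by omega)
    rw [← hnp]
    exact congrArg Prod.fst
      (sfr_loop _ _ (PySem.Int.mod_nonneg tf (by omega)) np.toNat)
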